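-- pv_equiv track=rewrite | github.com/josephchenhk/quantkits | quantkits/common/util.py | underscore_to_pascalcase
-- ===== SOURCE A (Python) =====
-- def underscore_to_pascalcase(value):
-- 	"""Convert abc_def to AbcDef"""
-- 	def pascalcase():
-- 		yield str.capitalize
-- 		while True:
-- 			yield str.lower
-- 	ret = ""
-- 	for x in value.split("_"):
-- 		c = pascalcase()
-- 		ret += c.__next__()(x)
-- 	return ret
-- ===== SOURCE B (Python) =====
-- def underscore_to_pascalcase(value):
--     chars = []
--     at_word_start = True
--     for ch in value:
--         if ch == "_":
--             at_word_start = True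
--         elif at_word_start:
--             chars.append(ch.title())
--             at_word_start = False
--         else:
--             chars.append(ch.lower())
--     return "".join(chars)
-- ===== Notes on version B (the rewrite author's own statement) =====
-- stated objective: alternative
-- what changed: Replaces the split-on-underscore word list with per-word capitalize (and A's generator gymnastics) by a single character-by-character pass keeping an at-word-start flag; no word list is ever built.
import Mathlib
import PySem

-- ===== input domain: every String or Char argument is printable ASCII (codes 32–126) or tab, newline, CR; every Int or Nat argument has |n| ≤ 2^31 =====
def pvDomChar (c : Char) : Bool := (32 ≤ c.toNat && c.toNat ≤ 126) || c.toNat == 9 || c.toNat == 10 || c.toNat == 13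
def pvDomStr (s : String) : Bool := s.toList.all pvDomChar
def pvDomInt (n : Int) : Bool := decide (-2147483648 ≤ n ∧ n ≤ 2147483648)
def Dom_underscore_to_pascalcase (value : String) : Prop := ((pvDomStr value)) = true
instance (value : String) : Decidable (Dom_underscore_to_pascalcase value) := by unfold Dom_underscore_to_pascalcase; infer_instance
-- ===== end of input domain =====

-- ===== PORT A =====
-- B changes the algorithm: one char-by-char pass with a word-start flag instead of
-- split("_") + per-word capitalize (objective: alternative decomposition, same cost).
-- A-side helpers.
-- value.split("_"): hand-ported (PySem has no single-char split kept this way is the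
-- textbook recursion); exact for Python's split with a one-char separator.
def pvSplitU : List Char → List (List Char)
  | [] => [[]]
  | c :: cs =>
    match pvSplitU cs with
    | [] => []  -- unreachable: pvSplitU never returns []
    | w :: ws => if c = '_' then [] :: w :: ws else (c :: w) :: ws

-- str.capitalize: title-case the first char, lower the rest; on the ASCII domain
-- title-case of a single char is upperChar, so this is exact on Dom.
def pvCapitalize : List Char → List Char
  | [] => []
  | c :: cs => PySem.Chars.upperChar c :: cs.map PySem.Chars.lowerChar

-- port of A: for each word of value.split("_"), the fresh generator yields
-- str.capitalize, so ret += capitalize(x).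
def underscore_to_pascalcase (value : String) : String :=
  String.mk ((pvSplitU value.toList).foldl (fun ret x => ret ++ pvCapitalize x) [])

-- ===== PORT B =====
def underscore_to_pascalcase_alt (value : String) : String :=
  -- single pass: state = (chars accumulated, at_word_start); ch.title() on a single
  -- ASCII char is upperChar (exact on Dom), ch.lower() is lowerChar.
  String.mk ((value.toList.foldl
    (fun (st : List Char × Bool) ch =>
      if ch = '_' then (st.1, true)
      else if st.2 then (st.1 ++ [PySem.Chars.upperChar ch], false)
      else (st.1 ++ [PySem.Chars.lowerChar ch], false))
    ([], true)).1)
-- ===== PRECONDITION & SPEC =====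
def Spec_underscore_to_pascalcase (value : String) (out : String) : Prop := out = underscore_to_pascalcase_alt value
instance (value : String) (out : String) : Decidable (Spec_underscore_to_pascalcase value out) := by unfold Spec_underscore_to_pascalcase; infer_instance

-- ===== CLAIM (what is proved, stated in full; the proofs are below) =====
def Claim_equal_underscore_to_pascalcase : Prop := ∀ (value : String), Dom_underscore_to_pascalcase value → Spec_underscore_to_pascalcase value (underscore_to_pascalcase value)

-- ===== LEMMAS AND PROOFS =====
-- functional views of the two sides: capitalize-mode / lower-mode of the remaining chars
mutual
def pvCapAll : List Char → List Char
  | [] => []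
  | c :: cs => if c = '_' then pvCapAll cs
               else PySem.Chars.upperChar c :: pvLowAll cs
def pvLowAll : List Char → List Char
  | [] => []
  | c :: cs => if c = '_' then pvCapAll cs
               else PySem.Chars.lowerChar c :: pvLowAll cs
end

theorem pvSplitU_ne_nil (cs : List Char) : pvSplitU cs ≠ [] := by
  induction cs with
  | nil => simp [pvSplitU]
  | cons c cs ih =>
    cases h : pvSplitU cs with
    | nil => exact absurd h ih
    | cons w ws => simp only [pvSplitU, h]; split <;> simp

theorem pvFoldl_append (ws : List (List Char)) (a b : List Char) :
    ws.foldl (fun ret x => ret ++ pvCapitalize x) (a ++ b)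
      = a ++ ws.foldl (fun ret x => ret ++ pvCapitalize x) b := by
  induction ws generalizing b with
  | nil => rfl
  | cons x xs ih => simp only [List.foldl_cons, List.append_assoc, ih]

-- A's fold equals pvCapAll (joint with the mid-word statement)
theorem pvA_eq_capAll (cs : List Char) :
    (pvSplitU cs).foldl (fun ret x => ret ++ pvCapitalize x) [] = pvCapAll cs ∧
    (∀ w ws, pvSplitU cs = w :: ws →
      w.map PySem.Chars.lowerChar ++ ws.foldl (fun ret x => ret ++ pvCapitalize x) [] = pvLowAll cs) := by
  induction cs with
  | nil =>
    refine ⟨by simp [pvSplitU, pvCapitalize, pvCapAll], ?_⟩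
    intro w ws h
    simp [pvSplitU] at h
    simp [h.1, h.2, pvLowAll]
  | cons c cs ih =>
    obtain ⟨ihA, ihW⟩ := ih
    cases h : pvSplitU cs with
    | nil => exact absurd h (pvSplitU_ne_nil cs)
    | cons w ws =>
      have hw := ihW w ws h
      by_cases hc : c = '_'
      · subst hc
        have hs : pvSplitU ('_' :: cs) = [] :: w :: ws := by simp [pvSplitU, h]
        constructor
        · rw [hs]
          simp only [List.foldl_cons, pvCapitalize, List.nil_append]
          rw [h] at ihA; simpa [pvCapAll] using ihA
        · intro w' ws' h'
          rw [hs] at h'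
          obtain ⟨hw', hws'⟩ := List.cons_eq_cons.mp h'
          subst hw'; subst hws'
          simp only [List.map_nil, List.nil_append, pvLowAll]
          rw [h] at ihA; simpa using ihA
      · have hs : pvSplitU (c :: cs) = (c :: w) :: ws := by simp [pvSplitU, h, hc]
        constructor
        · rw [hs]
          simp only [List.foldl_cons, List.nil_append]
          show ws.foldl (fun ret x => ret ++ pvCapitalize x)
              ([PySem.Chars.upperChar c] ++ w.map PySem.Chars.lowerChar) = _
          rw [pvFoldl_append]
          have h2 : ws.foldl (fun ret x => ret ++ pvCapitalize x) (w.map PySem.Chars.lowerChar)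
              = w.map PySem.Chars.lowerChar ++ ws.foldl (fun ret x => ret ++ pvCapitalize x) [] := by
            simpa using pvFoldl_append ws (w.map PySem.Chars.lowerChar) []
          rw [h2]
          simp only [pvCapAll, if_neg hc, List.singleton_append]
          rw [hw]
        · intro w' ws' h'
          rw [hs] at h'
          obtain ⟨hw', hws'⟩ := List.cons_eq_cons.mp h'
          subst hw'; subst hws'
          simp only [List.map_cons, List.cons_append, pvLowAll, if_neg hc]
          exact congrArg _ hw

-- B's fold equals pvCapAll / pvLowAll depending on the flag, with any accumulator
theorem pvB_fold (cs : List Char) : ∀ (acc : List Char) (st : Bool),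
    (cs.foldl
      (fun (s : List Char × Bool) ch =>
        if ch = '_' then (s.1, true)
        else if s.2 then (s.1 ++ [PySem.Chars.upperChar ch], false)
        else (s.1 ++ [PySem.Chars.lowerChar ch], false))
      (acc, st)).1 = acc ++ (if st then pvCapAll cs else pvLowAll cs) := by
  induction cs with
  | nil => intro acc st; cases st <;> simp [pvCapAll, pvLowAll]
  | cons c cs ih =>
    intro acc st
    by_cases hc : c = '_'
    · subst hc
      cases st <;> simp [List.foldl_cons, ih, pvCapAll, pvLowAll]
    · cases st <;> simp [List.foldl_cons, hc, ih, pvCapAll, pvLowAll]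

-- ===== VERDICT (by name: the statement is the Claim_ definition above) =====
theorem underscore_to_pascalcase_spec : Claim_equal_underscore_to_pascalcase := by
  intro value _
  unfold Spec_underscore_to_pascalcase underscore_to_pascalcase underscore_to_pascalcase_alt
  rw [(pvA_eq_capAll value.toList).1, pvB_fold value.toList [] true]
  simp
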